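-- pv_equiv track=rewrite | github.com/francesco-camaione/CodiceFiscale | main/util/utils.py | funzione_nomi
-- ===== SOURCE A (Python) =====
-- def funzione_nomi(nome: str):
--     cf_nome = 0
--     correct_v_n = ''
--     consonanti_nome = ''
--     vocali_nome = ''
--     condizione = True
--     vocali = 'a' 'e' 'i' 'o' 'u' ' ' 'A' 'E' 'I' 'O' 'U'
--     while cf_nome < len(nome) and condizione:
--         if nome[cf_nome] not in vocali:
--             consonanti_nome += nome[cf_nome]
--         if nome[cf_nome] in vocali:
--             vocali_nome += nome[cf_nome]
--         if len(consonanti_nome) == 4: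
--             correct_v_n = consonanti_nome[0:1] + consonanti_nome[2:3] + consonanti_nome[3:4]
--         if len(consonanti_nome) == 3:
--             correct_v_n = consonanti_nome[0:1] + consonanti_nome[1:2] + consonanti_nome[2:3]
--         if len(consonanti_nome) == 2:
--             correct_v_n = consonanti_nome[0:1] + consonanti_nome[1:2] + vocali_nome[0:1]
--
--         cf_nome += 1
--     return correct_v_n
-- ===== SOURCE B (Python) =====
-- def funzione_nomi(nome: str):
--     vocali = 'aeiou AEIOU'
--     cons = [c for c in nome if c not in vocali]
--     vow = [c for c in nome if c in vocali]
--     if len(cons) >= 4: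
--         return cons[0] + cons[2] + cons[3]
--     elif len(cons) == 3:
--         return cons[0] + cons[1] + cons[2]
--     elif len(cons) == 2:
--         return cons[0] + cons[1] + (vow[0] if vow else '')
--     else:
--         return ''
-- ===== Notes on version B (the rewrite author's own statement) =====
-- stated objective: faster
-- what changed: Replaced the index-driven while loop that interleaves filtering with per-iteration result overwrites (and quadratic string appends) by a filter-then-select decomposition: build the consonant and vowel lists once, then branch once on the consonant count.
import Mathlib
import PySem

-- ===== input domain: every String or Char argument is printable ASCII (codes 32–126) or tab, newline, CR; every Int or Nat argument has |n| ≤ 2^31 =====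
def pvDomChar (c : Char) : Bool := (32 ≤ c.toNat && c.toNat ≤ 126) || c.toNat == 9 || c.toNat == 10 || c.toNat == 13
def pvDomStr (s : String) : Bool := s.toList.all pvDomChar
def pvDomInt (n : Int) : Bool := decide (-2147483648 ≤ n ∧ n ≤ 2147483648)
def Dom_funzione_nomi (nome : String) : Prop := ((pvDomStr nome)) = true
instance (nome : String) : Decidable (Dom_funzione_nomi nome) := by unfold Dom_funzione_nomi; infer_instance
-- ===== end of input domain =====

-- B replaces A's interleaved while loop (filtering + per-iteration result overwrites) by
-- filter-then-select: build the consonant/vowel lists once, branch once on the consonant count (measured faster: A's per-iteration string appends are quadratic).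

-- ===== PORT A =====
-- the string literal 'a' 'e' 'i' 'o' 'u' ' ' 'A' 'E' 'I' 'O' 'U' (Python concatenates adjacent literals)
def vocaliStr : List Char := "aeiou AEIOU".toList

-- Python's membership test `c in vocali`
def isVow (c : Char) : Bool := vocaliStr.contains c

-- one iteration of A's while body; state = (correct_v_n, consonanti_nome, vocali_nome).
-- s[a:b] with literal in-range bounds is ported as take/drop (exact here: bounds are 0..4, nonneg).
def stepA (c : Char) (st : List Char × List Char × List Char) : List Char × List Char × List Char :=
  let cons := if !(isVow c) then st.2.1 ++ [c] else st.2.1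
  let voc := if isVow c then st.2.2 ++ [c] else st.2.2
  let correct1 := if cons.length = 4 then cons.take 1 ++ (cons.drop 2).take 1 ++ (cons.drop 3).take 1 else st.1
  let correct2 := if cons.length = 3 then cons.take 1 ++ (cons.drop 1).take 1 ++ (cons.drop 2).take 1 else correct1
  let correct3 := if cons.length = 2 then cons.take 1 ++ (cons.drop 1).take 1 ++ voc.take 1 else correct2
  (correct3, cons, voc)

-- the while loop: cf_nome walks the characters in order ('condizione' is never set to False)
def runA : List Char → (List Char × List Char × List Char) → (List Char × List Char × List Char)
  | [], st => st
  | c :: rest, st => runA rest (stepA c st)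

def funzione_nomi (nome : String) : String := String.mk (runA nome.toList ([], [], [])).1   -- each '' ports to []

-- ===== PORT B =====
def funzione_nomi_alt (nome : String) : String :=
  let cons := nome.toList.filter (fun c => !(isVow c))
  let vow := nome.toList.filter (fun c => isVow c)
  if 4 ≤ cons.length then String.mk [cons.getD 0 ' ', cons.getD 2 ' ', cons.getD 3 ' ']
  else if cons.length = 3 then String.mk [cons.getD 0 ' ', cons.getD 1 ' ', cons.getD 2 ' ']
  else if cons.length = 2 then String.mk ([cons.getD 0 ' ', cons.getD 1 ' '] ++ vow.take 1)
  else ""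

-- ===== PRECONDITION & SPEC =====
def Spec_funzione_nomi (nome : String) (out : String) : Prop := out = funzione_nomi_alt nome
instance (nome : String) (out : String) : Decidable (Spec_funzione_nomi nome out) := by unfold Spec_funzione_nomi; infer_instance

-- ===== CLAIM (what is proved, stated in full; the proofs are below) =====
def Claim_equal_funzione_nomi : Prop := ∀ (nome : String), Dom_funzione_nomi nome → Spec_funzione_nomi nome (funzione_nomi nome)

-- ===== LEMMAS AND PROOFS =====

-- closed form of A's loop result, list-side (take/drop form; shown equal to both ports)
def altList (l : List Char) : List Char :=
  let C := l.filter (fun c => !(isVow c))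
  let V := l.filter (fun c => isVow c)
  if 4 ≤ C.length then C.take 1 ++ (C.drop 2).take 1 ++ (C.drop 3).take 1
  else if C.length = 3 then C.take 1 ++ (C.drop 1).take 1 ++ (C.drop 2).take 1
  else if C.length = 2 then C.take 1 ++ (C.drop 1).take 1 ++ V.take 1
  else []

theorem runA_snoc (l : List Char) (c : Char) (st : List Char × List Char × List Char) :
    runA (l ++ [c]) st = stepA c (runA l st) := by
  induction l generalizing st with
  | nil => rfl
  | cons a t ih => simp [runA, ih]

theorem runA_cons (l : List Char) (st : List Char × List Char × List Char) :
    (runA l st).2.1 = st.2.1 ++ l.filter (fun c => !(isVow c)) := by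
  induction l generalizing st with
  | nil => simp [runA]
  | cons a t ih =>
    rw [runA, ih (stepA a st)]
    by_cases hv : isVow a = true <;> simp [stepA, hv, List.filter_cons]

theorem runA_voc (l : List Char) (st : List Char × List Char × List Char) :
    (runA l st).2.2 = st.2.2 ++ l.filter (fun c => isVow c) := by
  induction l generalizing st with
  | nil => simp [runA]
  | cons a t ih =>
    rw [runA, ih (stepA a st)]
    by_cases hv : isVow a = true <;> simp [stepA, hv, List.filter_cons]

theorem take1_drop_append {α : Type} (C : List α) (c : α) (k : ℕ) (h : k + 1 ≤ C.length) :
    ((C ++ [c]).drop k).take 1 = (C.drop k).take 1 := by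
  rw [List.drop_append_of_le_length (by omega)]
  rw [List.take_append_of_le_length (by rw [List.length_drop]; omega)]

theorem step_alt (t : List Char) (c : Char) :
    (stepA c (altList t, t.filter (fun c => !(isVow c)), t.filter (fun c => isVow c))).1
      = altList (t ++ [c]) := by
  have hfc : (t ++ [c]).filter (fun c => !(isVow c))
      = t.filter (fun c => !(isVow c)) ++ (if isVow c then [] else [c]) := by
    by_cases h : isVow c = true <;> simp [List.filter_append, h]
  have hfv : (t ++ [c]).filter (fun c => isVow c)
      = t.filter (fun c => isVow c) ++ (if isVow c then [c] else []) := by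
    by_cases h : isVow c = true <;> simp [List.filter_append, h]
  by_cases hv : isVow c = true
  · -- c is a vowel: consonant list unchanged, vowel list gains c
    simp only [stepA, altList, hfc, hfv, hv, Bool.not_true, Bool.false_eq_true, reduceIte,
      List.append_nil]
    split_ifs <;> first
      | rfl
      | omega
      | (simp only [altList]; rw [if_neg (by omega), if_neg (by omega), if_neg (by omega)])
      | (simp only [altList]; rw [if_pos (by omega)])
  · -- c is a consonant: consonant list gains c, vowel list unchanged
    have hv' : isVow c = false := by revert hv; cases isVow c <;> simp
    simp only [stepA, altList, hfc, hfv, hv', Bool.not_false, Bool.false_eq_true, reduceIte,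
      List.append_nil]
    have hlen : (t.filter (fun c => !(isVow c)) ++ [c]).length
        = (t.filter (fun c => !(isVow c))).length + 1 := by simp
    rw [hlen]
    split_ifs <;> first
      | rfl
      | omega
      | (rw [List.take_append_of_le_length (by omega),
             take1_drop_append _ _ _ (by omega),
             take1_drop_append _ _ _ (by omega)])

theorem runA_correct (l : List Char) : (runA l ([], [], [])).1 = altList l := by
  induction l using List.reverseRecOn with
  | nil => simp [runA, altList]
  | append_singleton t c ih =>
    rw [runA_snoc]
    have hst : runA t ([], [], [])
        = (altList t, t.filter (fun c => !(isVow c)), t.filter (fun c => isVow c)) := by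
      have h1 := runA_cons t ([], [], [])
      have h2 := runA_voc t ([], [], [])
      simp only [List.nil_append] at h1 h2
      exact Prod.ext (by simpa using ih) (Prod.ext (by simpa using h1) (by simpa using h2))
    rw [hst, step_alt]

theorem len2_destruct {α : Type} (l : List α) (h : l.length = 2) : ∃ a b, l = [a, b] := by
  rcases l with _ | ⟨a, l⟩
  · simp at h
  rcases l with _ | ⟨b, l⟩
  · simp at h
  rcases l with _ | ⟨d, l⟩
  · exact ⟨a, b, rfl⟩
  · simp at h

theorem len3_destruct {α : Type} (l : List α) (h : l.length = 3) : ∃ a b d, l = [a, b, d] := by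
  rcases l with _ | ⟨a, l⟩
  · simp at h
  obtain ⟨b, d, rfl⟩ := len2_destruct l (by simpa using h)
  exact ⟨a, b, d, rfl⟩

theorem len4_destruct {α : Type} (l : List α) (h : 4 ≤ l.length) :
    ∃ a b d e r, l = a :: b :: d :: e :: r := by
  rcases l with _ | ⟨a, l⟩
  · simp at h
  rcases l with _ | ⟨b, l⟩
  · simp at h
  rcases l with _ | ⟨d, l⟩
  · simp at h
  rcases l with _ | ⟨e, r⟩
  · simp at h
  exact ⟨a, b, d, e, r, rfl⟩

theorem alt_eq (nome : String) : funzione_nomi_alt nome = String.mk (altList nome.toList) := by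
  unfold funzione_nomi_alt altList
  by_cases h4 : 4 ≤ (nome.toList.filter (fun c => !(isVow c))).length
  · obtain ⟨a, b, d, e, r, hl⟩ := len4_destruct _ h4
    rw [hl] at h4 ⊢
    simp [h4]
  · rw [if_neg h4, if_neg h4]
    by_cases h3 : (nome.toList.filter (fun c => !(isVow c))).length = 3
    · obtain ⟨a, b, d, hl⟩ := len3_destruct _ h3
      rw [hl] at h3 ⊢
      simp
    · rw [if_neg h3, if_neg h3]
      by_cases h2 : (nome.toList.filter (fun c => !(isVow c))).length = 2
      · obtain ⟨a, b, hl⟩ := len2_destruct _ h2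
        rw [hl] at h2 ⊢
        simp
      · rw [if_neg h2, if_neg h2]
        rfl

-- ===== VERDICT (by name: the statement is the Claim_ definition above) =====
theorem funzione_nomi_spec : Claim_equal_funzione_nomi := by
  intro nome _
  unfold Spec_funzione_nomi funzione_nomi
  rw [alt_eq, runA_correct]
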